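-- pv_equiv track=rewrite | github.com/xiaowucn/Scriber-Backend | remarkable/plugins/sse/sse_predictor_with_records/utils.py | get_col_0_merge_info
-- ===== SOURCE A (Python) =====
-- def get_real_height_for_col_merge(col_1_heights):
--     # 统计第一列在第0列合并单元格右侧的单元格个数
--     real_height = 0
--     for _ in col_1_heights:
--         if _ > 0:
--             real_height += 1
--     return real_height
--
-- def get_col_0_merge_info(col_0_heights, col_1_heights):
--     real_merge_lens = []
--     merge_lens = []
--     merge_idxs = []
--     merge_nums = []
--     merge_range = []
--     height_info = {}
--     for i, height in enumerate(col_0_heights):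
--         if height > 1:
--             real_height = get_real_height_for_col_merge(col_1_heights[i : i + height])
--             height_info[i] = height
--             if real_height in real_merge_lens:
--                 cur_height_idx = real_merge_lens.index(real_height)
--                 merge_idxs[cur_height_idx].append(i)
--                 merge_nums[cur_height_idx] += 1
--             else:
--                 real_merge_lens.append(real_height)
--                 merge_idxs.append([i])
--                 merge_nums.append(1)
--             if height in merge_lens:
--                 pass
--             else:
--                 merge_lens.append(height)
--     if not merge_nums:
--         return []
--     max_merge_idx = merge_nums.index(max(merge_nums))
--     real_merge_len = real_merge_lens[max_merge_idx]
--     if real_merge_len >= 4: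
--         for idx in merge_idxs[max_merge_idx]:
--             merge_range.append([idx, idx + height_info[idx] - 1])
--         if real_merge_len - 2 in real_merge_lens:
--             cur_len_idx = real_merge_lens.index(real_merge_len - 2)
--             for idx in merge_idxs[cur_len_idx]:
--                 merge_range.append([idx, idx + height_info[idx] - 1])
--         if real_merge_len - 1 in real_merge_lens:
--             cur_len_idx = real_merge_lens.index(real_merge_len - 1)
--             for idx in merge_idxs[cur_len_idx]:
--                 merge_range.append([idx, idx + height_info[idx] - 1])
--         if real_merge_len + 1 in real_merge_lens:
--             cur_len_idx = real_merge_lens.index(real_merge_len + 1)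
--             for idx in merge_idxs[cur_len_idx]:
--                 merge_range.append([idx, idx + height_info[idx] - 1])
--         if real_merge_len + 2 in real_merge_lens:
--             cur_len_idx = real_merge_lens.index(real_merge_len + 2)
--             for idx in merge_idxs[cur_len_idx]:
--                 merge_range.append([idx, idx + height_info[idx] - 1])
--         if real_merge_len + 3 in real_merge_lens:
--             cur_len_idx = real_merge_lens.index(real_merge_len + 3)
--             for idx in merge_idxs[cur_len_idx]:
--                 merge_range.append([idx, idx + height_info[idx] - 1])
--     else:
--         for idx in merge_idxs[max_merge_idx]:
--             merge_range.append([idx, idx + height_info[idx] - 1])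
--     return merge_range
-- ===== SOURCE B (Python) =====
-- def get_col_0_merge_info(col_0_heights, col_1_heights):
--     # prefix[k] = number of positive entries among col_1_heights[:k]
--     prefix = [0]
--     for h in col_1_heights:
--         prefix.append(prefix[-1] + (1 if h > 0 else 0))
--     n1 = len(col_1_heights)
--     groups = {}  # real merged height -> list of (start_index, height), insertion order
--     for i, height in enumerate(col_0_heights):
--         if height > 1:
--             rh = prefix[min(i + height, n1)] - prefix[min(i, n1)]
--             groups.setdefault(rh, []).append((i, height))
--     if not groups:
--         return []
--     best = max(groups, key=lambda k: len(groups[k]))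
--     order = [best] + ([best - 2, best - 1, best + 1, best + 2, best + 3] if best >= 4 else [])
--     return [[i, i + h - 1] for k in order for i, h in groups.get(k, [])]
-- ===== Notes on version B (the rewrite author's own statement) =====
-- stated objective: faster
-- what changed: B replaces A's per-row rescans (an O(h) positive-count over a slice for every merged row, plus repeated list.index scans over parallel lists) with one prefix-sum array giving each window count in O(1) and a single insertion-ordered dict grouping (real_height -> [(index, height)]), then emits the result by iterating the wanted-key order over dict lookups.
import Mathlib
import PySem

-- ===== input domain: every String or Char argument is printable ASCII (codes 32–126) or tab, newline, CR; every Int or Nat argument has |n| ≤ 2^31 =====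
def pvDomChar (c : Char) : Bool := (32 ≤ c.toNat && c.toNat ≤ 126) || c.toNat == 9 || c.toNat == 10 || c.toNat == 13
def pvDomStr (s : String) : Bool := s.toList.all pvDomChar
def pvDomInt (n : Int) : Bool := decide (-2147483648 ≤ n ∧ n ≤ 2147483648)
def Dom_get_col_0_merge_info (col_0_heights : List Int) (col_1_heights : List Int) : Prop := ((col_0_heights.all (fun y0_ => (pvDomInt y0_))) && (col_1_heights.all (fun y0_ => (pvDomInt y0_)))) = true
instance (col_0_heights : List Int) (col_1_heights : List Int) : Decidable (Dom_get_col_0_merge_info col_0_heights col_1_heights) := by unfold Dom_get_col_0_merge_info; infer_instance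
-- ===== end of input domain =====

-- B replaces A's per-row O(h) positive-count rescans and repeated list.index scans with one
-- prefix-sum array (O(1) window counts) and a single insertion-ordered dict grouping; same results.


-- ===== PORT A =====
def get_real_height_for_col_merge (col_1_heights : List Int) : Int :=
  col_1_heights.foldl (fun real_height h => if h > 0 then real_height + 1 else real_height) 0

-- the state of A's first loop: (real_merge_lens, merge_lens, merge_idxs, merge_nums, height_info)
def pvAStep (col_1_heights : List Int)
    (st : List Int × List Int × List (List Int) × List Int × PySem.Dict Int Int) (p : Int × Int) :
    List Int × List Int × List (List Int) × List Int × PySem.Dict Int Int :=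
  match st, p with
  | (rml, ml, mi, mn, hinfo), (i, height) =>
    if height > 1 then
      let real_height := get_real_height_for_col_merge
        (PySem.List.slice col_1_heights (some i) (some (i + height)))
      let hinfo := hinfo.insert i height
      let (rml, mi, mn) :=
        if real_height ∈ rml then
          -- list.index: always found here, membership was just tested
          let j := (PySem.List.index? rml real_height).getD 0
          (rml, PySem.List.pySetD mi (j : Int) (PySem.List.pyGetD mi (j : Int) [] ++ [i]),
                PySem.List.pySetD mn (j : Int) (PySem.List.pyGetD mn (j : Int) 0 + 1))
        else (rml ++ [real_height], mi ++ [[i]], mn ++ [1])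
      let ml := if height ∈ ml then ml else ml ++ [height]
      (rml, ml, mi, mn, hinfo)
    else (rml, ml, mi, mn, hinfo)

-- the 'for idx in merge_idxs[…]: merge_range.append([idx, idx + height_info[idx] - 1])' loops
-- (height_info[idx]: the key is always present, so getD is exact here)
def pvAEmit (hinfo : PySem.Dict Int Int) (idxs : List Int) (acc : List (List Int)) : List (List Int) :=
  idxs.foldl (fun acc idx => acc ++ [[idx, idx + hinfo.getD idx 0 - 1]]) acc

def get_col_0_merge_info (col_0_heights : List Int) (col_1_heights : List Int) : List (List Int) :=
  -- the loop, then unpack the loop state (merge_lens is dead: the Python never reads it back)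
  let st := (PySem.List.enumerate col_0_heights).foldl (pvAStep col_1_heights)
      ([], [], [], [], PySem.Dict.empty)
  let real_merge_lens := st.1
  let merge_idxs := st.2.2.1
  let merge_nums := st.2.2.2.1
  let height_info := st.2.2.2.2
  (if merge_nums = [] then []
    else
      -- merge_nums.index(max(merge_nums)): the max of a nonempty list is a member, always found
      let max_merge_idx := (PySem.List.index? merge_nums
        ((PySem.List.max? merge_nums id).getD 0)).getD 0
      let real_merge_len := PySem.List.pyGetD real_merge_lens (max_merge_idx : Int) 0
      if real_merge_len ≥ 4 then
        let mr := pvAEmit height_info (PySem.List.pyGetD merge_idxs (max_merge_idx : Int) []) []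
        let mr := if real_merge_len - 2 ∈ real_merge_lens then
            pvAEmit height_info (PySem.List.pyGetD merge_idxs
              (((PySem.List.index? real_merge_lens (real_merge_len - 2)).getD 0 : Nat) : Int) []) mr
          else mr
        let mr := if real_merge_len - 1 ∈ real_merge_lens then
            pvAEmit height_info (PySem.List.pyGetD merge_idxs
              (((PySem.List.index? real_merge_lens (real_merge_len - 1)).getD 0 : Nat) : Int) []) mr
          else mr
        let mr := if real_merge_len + 1 ∈ real_merge_lens then
            pvAEmit height_info (PySem.List.pyGetD merge_idxs
              (((PySem.List.index? real_merge_lens (real_merge_len + 1)).getD 0 : Nat) : Int) []) mr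
          else mr
        let mr := if real_merge_len + 2 ∈ real_merge_lens then
            pvAEmit height_info (PySem.List.pyGetD merge_idxs
              (((PySem.List.index? real_merge_lens (real_merge_len + 2)).getD 0 : Nat) : Int) []) mr
          else mr
        let mr := if real_merge_len + 3 ∈ real_merge_lens then
            pvAEmit height_info (PySem.List.pyGetD merge_idxs
              (((PySem.List.index? real_merge_lens (real_merge_len + 3)).getD 0 : Nat) : Int) []) mr
          else mr
        mr
      else pvAEmit height_info (PySem.List.pyGetD merge_idxs (max_merge_idx : Int) []) [])

-- ===== PORT B =====
-- B's grouping loop: groups.setdefault(rh, []).append((i, height)) is Dict.modify rh [] (· ++ [(i, height)])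
def pvBStep (pre : List Int) (n1 : Int)
    (g : PySem.Dict Int (List (Int × Int))) (p : Int × Int) : PySem.Dict Int (List (Int × Int)) :=
  if p.2 > 1 then
    let rh := PySem.List.pyGetD pre (min (p.1 + p.2) n1) 0 - PySem.List.pyGetD pre (min p.1 n1) 0
    g.modify rh [] (· ++ [(p.1, p.2)])
  else g

def get_col_0_merge_info_alt (col_0_heights : List Int) (col_1_heights : List Int) : List (List Int) :=
  let pre := col_1_heights.foldl
    (fun pre h => pre ++ [PySem.List.pyGetD pre (-1) 0 + (if h > 0 then 1 else 0)]) [(0 : Int)]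
  let n1 := PySem.List.len col_1_heights
  let groups := (PySem.List.enumerate col_0_heights).foldl (pvBStep pre n1) (PySem.Dict.empty : PySem.Dict Int (List (Int × Int)))
  if groups.size = 0 then []
  else
    let best := PySem.List.maxD groups.keys (fun k => PySem.List.len (groups.getD k [])) 0
    let order := [best] ++ (if best ≥ 4 then [best - 2, best - 1, best + 1, best + 2, best + 3] else [])
    order.flatMap (fun k => (groups.getD k []).map (fun q => [q.1, q.1 + q.2 - 1]))

-- ===== PRECONDITION & SPEC =====
def Spec_get_col_0_merge_info (col_0_heights : List Int) (col_1_heights : List Int) (out : List (List Int)) : Prop := out = get_col_0_merge_info_alt col_0_heights col_1_heights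
instance (col_0_heights : List Int) (col_1_heights : List Int) (out : List (List Int)) : Decidable (Spec_get_col_0_merge_info col_0_heights col_1_heights out) := by unfold Spec_get_col_0_merge_info; infer_instance

-- ===== CLAIM (what is proved, stated in full; the proofs are below) =====
def Claim_equal_get_col_0_merge_info : Prop := ∀ (col_0_heights : List Int) (col_1_heights : List Int), Dom_get_col_0_merge_info col_0_heights col_1_heights → Spec_get_col_0_merge_info col_0_heights col_1_heights (get_col_0_merge_info col_0_heights col_1_heights)

-- ===== LEMMAS AND PROOFS =====

-- number of positive entries among the first k entries of col_1
def pvCnt (col1 : List Int) (k : Nat) : Int :=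
  ((col1.take k).countP (fun h => decide (0 < h)) : Int)

-- B's prefix list is the table of pvCnt
theorem pvPrefix_spec (c1 : List Int) :
    c1.foldl (fun pre h => pre ++ [PySem.List.pyGetD pre (-1) 0 + (if h > 0 then 1 else 0)]) [(0 : Int)]
      = (List.range (c1.length + 1)).map (pvCnt c1) := by
  induction c1 using List.reverseRecOn with
  | nil => simp [pvCnt]
  | append_singleton xs x ih =>
    rw [List.foldl_append, ih]
    have hsplit : (List.range (xs.length + 1)).map (pvCnt xs)
        = (List.range xs.length).map (pvCnt xs) ++ [pvCnt xs xs.length] := by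
      rw [List.range_succ, List.map_append]; rfl
    rw [hsplit]
    simp only [List.foldl_cons, List.foldl_nil, PySem.List.pyGetD_neg_one_append_singleton]
    have hlen : (xs ++ [x]).length = xs.length + 1 := by simp
    rw [hlen, List.range_succ, List.map_append, List.range_succ, List.map_append]
    have hagree : ∀ k, k ≤ xs.length → pvCnt (xs ++ [x]) k = pvCnt xs k := by
      intro k hk
      unfold pvCnt
      rw [List.take_append_of_le_length hk]
    have h1 : (List.range xs.length).map (pvCnt (xs ++ [x])) = (List.range xs.length).map (pvCnt xs) := by
      apply List.map_congr_left
      intro k hk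
      exact hagree k (le_of_lt (List.mem_range.mp hk))
    have h2 : pvCnt (xs ++ [x]) xs.length = pvCnt xs xs.length := hagree _ le_rfl
    have h3 : pvCnt (xs ++ [x]) (xs.length + 1) = pvCnt xs xs.length + (if x > 0 then 1 else 0) := by
      unfold pvCnt
      rw [List.take_of_length_le (by simp), List.take_of_length_le (by simp), List.countP_append]
      simp only [List.countP_cons, List.countP_nil]
      push_cast
      by_cases hx : 0 < x <;> simp [hx]
    simp [h1, h2, h3]

-- the two ways to count positives in the window agree
theorem pvRh_eq (c1 : List Int) (i h : Int) (h0 : 0 ≤ i) (h1 : 1 < h) :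
    get_real_height_for_col_merge (PySem.List.slice c1 (some i) (some (i + h)))
      = PySem.List.pyGetD ((List.range (c1.length + 1)).map (pvCnt c1))
          (min (i + h) (PySem.List.len c1)) 0
        - PySem.List.pyGetD ((List.range (c1.length + 1)).map (pvCnt c1))
          (min i (PySem.List.len c1)) 0 := by
  have hlen := PySem.List.len_eq c1
  have key : ∀ m : Int, 0 ≤ m →
      PySem.List.pyGetD ((List.range (c1.length + 1)).map (pvCnt c1)) (min m (PySem.List.len c1)) 0
        = pvCnt c1 (min m.toNat c1.length) := by
    intro m hm
    have h0' : (0:Int) ≤ min m (PySem.List.len c1) := by rw [hlen]; omega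
    have : min m (PySem.List.len c1) = ((min m.toNat c1.length : Nat) : Int) := by
      rw [hlen]; omega
    rw [this, PySem.List.pyGetD_natCast, PySem.List.getD_map_range _ _ _ _ (by omega)]
  rw [key _ (by omega), key _ h0]
  have hcl : ∀ m : Nat, pvCnt c1 (min m c1.length) = pvCnt c1 m := by
    intro m
    unfold pvCnt
    congr 2
    rcases le_total m c1.length with hle | hle
    · simp [Nat.min_eq_left hle]
    · rw [Nat.min_eq_right hle, List.take_of_length_le hle, List.take_of_length_le le_rfl]
  rw [hcl, hcl]
  have hslice : PySem.List.slice c1 (some i) (some (i + h))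
      = (c1.drop i.toNat).take ((i + h).toNat - i.toNat) :=
    PySem.List.slice_toNat c1 h0 (by omega)
  unfold get_real_height_for_col_merge
  rw [hslice, PySem.List.foldl_ite_add_one (fun x : Int => x > 0)]
  have htk : (i + h).toNat = i.toNat + ((i + h).toNat - i.toNat) := by omega
  unfold pvCnt
  rw [htk, List.take_add, List.countP_append]
  push_cast
  have : (fun x : Int => decide (x > 0)) = (fun x : Int => decide (0 < x)) := by
    funext x; simp [gt_iff_lt]
  rw [this]
  have he : i.toNat + ((i + h).toNat - i.toNat) - i.toNat = (i + h).toNat - i.toNat := by omega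
  rw [he]
  ring

-- replacing the (unique) pair keyed r is a List.set at its position
theorem pvMapReplaceEqSet {β : Type} (l : List (Int × β)) (r : Int) (v : Int × β) (t : Nat)
    (hnd : (l.map Prod.fst).Nodup) (ht : List.idxOf? r (l.map Prod.fst) = some t) :
    l.map (fun p => if p.1 == r then v else p) = l.set t v := by
  induction l generalizing t with
  | nil => simp at ht
  | cons a tl ih =>
    simp only [List.map_cons, List.idxOf?_cons] at ht
    simp only [List.map_cons, List.nodup_cons] at hnd
    by_cases ha : a.1 = r
    · rw [if_pos (by simpa using ha)] at ht
      obtain rfl : t = 0 := by simpa using ht.symm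
      have hrest : ∀ p ∈ tl, (fun p : Int × β => if p.1 == r then v else p) p = p := by
        intro p hp
        show (if p.1 == r then v else p) = p
        rw [if_neg]
        simp only [beq_iff_eq]
        intro e; exact hnd.1 (by rw [ha, ← e]; exact List.mem_map_of_mem hp)
      rw [List.set_cons_zero, List.map_cons]
      congr 1
      · show (if a.1 == r then v else a) = v
        rw [if_pos (by simpa using ha)]
      · rw [List.map_congr_left hrest]; simp
    · rw [if_neg (by simpa using ha)] at ht
      obtain ⟨t', ht', rfl⟩ := Option.map_eq_some_iff.mp ht
      rw [List.set_cons_succ, List.map_cons, ih t' hnd.2 ht']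
      congr 1
      show (if a.1 == r then v else a) = a
      rw [if_neg (by simpa using ha)]

-- idxOf? through an append
theorem pvIdxOf?_append_left {α : Type} [BEq α] [LawfulBEq α] {l1 : List α} (l2 : List α) {v : α}
    {j : Nat} (h : List.idxOf? v l1 = some j) : List.idxOf? v (l1 ++ l2) = some j := by
  induction l1 generalizing j with
  | nil => simp at h
  | cons a t ih =>
    rw [List.idxOf?_cons] at h
    rw [List.cons_append, List.idxOf?_cons]
    split at h <;> rename_i hb
    · rw [if_pos hb]; exact h
    · rw [if_neg hb]
      obtain ⟨j', hj', rfl⟩ := Option.map_eq_some_iff.mp h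
      simp [ih hj']

theorem pvIdxOf?_append_right {α : Type} [BEq α] [LawfulBEq α] {l1 : List α} (l2 : List α) {v : α}
    (h : v ∉ l1) : List.idxOf? v (l1 ++ l2) = (List.idxOf? v l2).map (· + l1.length) := by
  induction l1 with
  | nil => simp
  | cons a t ih =>
    simp only [List.mem_cons, not_or] at h
    rw [List.cons_append, List.idxOf?_cons, if_neg (by simp; exact fun e => h.1 e.symm), ih h.2]
    cases List.idxOf? v l2
    · simp
    · simp; omega

-- value list found at position t of the keys
theorem pvKeyVal (g : PySem.Dict Int (List (Int × Int))) (r : Int) (t : Nat)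
    (hnd : g.keys.Nodup) (ht : List.idxOf? r g.keys = some t) :
    g.getD r [] = g.values.getD t [] := by
  obtain ⟨h1, h2, -⟩ := List.idxOf?_eq_some_iff.mp ht
  have hlen : t < g.items.length := by simpa [PySem.Dict.keys] using h1
  have hk : g.items[t].1 = r := by simpa [PySem.Dict.keys] using h2
  have hmem : (r, g.items[t].2) ∈ g.items := by
    rw [← hk]; exact List.getElem_mem hlen
  rw [PySem.Dict.getD_of_mem_items g hmem hnd]
  simp [PySem.Dict.values, List.getElem?_eq_getElem hlen]

-- selection: A's index-of-max over merge_nums picks the same group as B's max over keys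
theorem pvSel (items : List (Int × List (Int × Int))) (w : Int → Int)
    (hw : ∀ pr ∈ items, w pr.1 = (pr.2.length : Int)) (hne : items ≠ []) :
    ∃ m j, PySem.List.max? (items.map (fun pr => (pr.2.length : Int))) id = some m ∧
      List.idxOf? m (items.map (fun pr => (pr.2.length : Int))) = some j ∧
      j < items.length ∧
      (items.map (fun pr => (pr.2.length : Int))).getD j 0 = m ∧
      PySem.List.max? (items.map Prod.fst) w = some ((items.map Prod.fst).getD j 0) := by
  induction items using List.reverseRecOn with
  | nil => exact absurd rfl hne
  | append_singleton l pr ih =>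
    by_cases hl : l = []
    · subst hl
      refine ⟨(pr.2.length : Int), 0, ?_, ?_, ?_, ?_, ?_⟩ <;>
        simp [PySem.List.max?]
    · obtain ⟨m, j, hmax, hidx, hjlt, hgd, hbmax⟩ :=
        ih (fun q hq => hw q (List.mem_append_left _ hq)) hl
      set c : Int := (pr.2.length : Int) with hc
      have hmapA : (l ++ [pr]).map (fun pr => (pr.2.length : Int))
          = l.map (fun pr => (pr.2.length : Int)) ++ [c] := by simp [hc]
      have hmapK : (l ++ [pr]).map Prod.fst = l.map Prod.fst ++ [pr.1] := by simp
      have hmaxA : PySem.List.max? ((l ++ [pr]).map (fun pr => (pr.2.length : Int))) id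
          = if m < c then some c else some m := by
        rw [hmapA]
        unfold PySem.List.max? at hmax ⊢
        rw [List.foldl_append, hmax]
        simp [id]
      have hwpr : w pr.1 = c := hw pr (by simp)
      have hwj : w ((l.map Prod.fst).getD j 0) = m := by
        have hj' : j < l.length := hjlt
        rw [List.getD_eq_getElem _ _ (by simpa using hj')]
        have := hw (l[j]) (List.mem_append_left _ (List.getElem_mem hj'))
        simp only [List.getElem_map]
        rw [this]
        rw [List.getD_eq_getElem _ _ (by simpa using hj')] at hgd
        simpa using hgd
      have hmaxB : PySem.List.max? ((l ++ [pr]).map Prod.fst) w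
          = if m < c then some pr.1 else some ((l.map Prod.fst).getD j 0) := by
        rw [hmapK]
        unfold PySem.List.max? at hbmax ⊢
        rw [List.foldl_append, hbmax]
        show (if w ((List.map Prod.fst l).getD j 0) < w pr.1 then some pr.1
            else some ((List.map Prod.fst l).getD j 0)) = _
        rw [hwpr, hwj]
      by_cases hmc : m < c
      · refine ⟨c, l.length, ?_, ?_, by simp, ?_, ?_⟩
        · rw [hmaxA, if_pos hmc]
        · rw [hmapA]
          have hnot : c ∉ l.map (fun pr => (pr.2.length : Int)) := by
            intro hmem
            exact absurd (PySem.List.max?_isMax hmax c hmem) (by simpa [id] using hmc)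
          rw [pvIdxOf?_append_right _ hnot]
          simp [List.idxOf?_cons]
        · rw [hmapA, List.getD_append_right _ _ _ _ (by simp)]
          simp
        · rw [hmaxB, if_pos hmc, hmapK, List.getD_append_right _ _ _ _ (by simp)]
          simp
      · refine ⟨m, j, ?_, ?_, by simp; omega, ?_, ?_⟩
        · rw [hmaxA, if_neg hmc]
        · rw [hmapA]; exact pvIdxOf?_append_left _ hidx
        · rw [hmapA, List.getD_append _ _ _ _ (by simpa using hjlt)]
          exact hgd
        · rw [hmaxB, if_neg hmc, hmapK, List.getD_append _ _ _ _ (by simpa using hjlt)]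

-- the invariant tying A's parallel lists to B's dict
def pvInv (bound : Int) (st : List Int × List Int × List (List Int) × List Int × PySem.Dict Int Int)
    (g : PySem.Dict Int (List (Int × Int))) : Prop :=
  st.1 = g.keys ∧
  st.2.2.1 = g.values.map (fun v => v.map Prod.fst) ∧
  st.2.2.2.1 = g.values.map (fun v => (v.length : Int)) ∧
  g.keys.Nodup ∧
  (∀ pr ∈ g.items, ∀ q ∈ pr.2, st.2.2.2.2.get? q.1 = some q.2 ∧ 0 ≤ q.1 ∧ q.1 < bound)

theorem pvInv_mono {b b' : Int} {st g} (h : pvInv b st g) (hb : b ≤ b') : pvInv b' st g := by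
  obtain ⟨h1, h2, h3, h4, h5⟩ := h
  exact ⟨h1, h2, h3, h4, fun pr hpr q hq =>
    ⟨(h5 pr hpr q hq).1, (h5 pr hpr q hq).2.1, lt_of_lt_of_le (h5 pr hpr q hq).2.2 hb⟩⟩

theorem pvStep (c1 : List Int) (i x : Int)
    (st : List Int × List Int × List (List Int) × List Int × PySem.Dict Int Int)
    (g : PySem.Dict Int (List (Int × Int))) (h0 : 0 ≤ i) (hinv : pvInv i st g) :
    pvInv (i + 1) (pvAStep c1 st (i, x))
      (pvBStep ((List.range (c1.length + 1)).map (pvCnt c1)) (PySem.List.len c1) g (i, x)) := by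
  obtain ⟨rml, ml, mi, mn, hinfo⟩ := st
  obtain ⟨hk, hmi, hmn, hnd, hh⟩ := hinv
  simp only at hk hmi hmn hh
  by_cases hx : x > 1
  · have hrh := pvRh_eq c1 i x h0 hx
    simp only [pvAStep, pvBStep, if_pos hx]
    rw [← hrh]
    set r := get_real_height_for_col_merge (PySem.List.slice c1 (some i) (some (i + x))) with hr
    have hlenkeys : g.keys.length = g.items.length := by simp [PySem.Dict.keys]
    have hlenvals : g.values.length = g.items.length := by simp [PySem.Dict.values]
    by_cases hmem : r ∈ rml
    · rw [if_pos hmem]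
      have hrk : r ∈ g.keys := hk ▸ hmem
      have hcont : g.contains r = true := (PySem.Dict.contains_iff_mem_keys g r).mpr hrk
      obtain ⟨t, ht⟩ : ∃ t, List.idxOf? r g.keys = some t := by
        cases hcase : List.idxOf? r g.keys with
        | none => exact absurd (List.idxOf?_eq_none_iff.mp hcase) (by simpa using hrk)
        | some t => exact ⟨t, rfl⟩
      obtain ⟨htlt, htk, -⟩ := List.idxOf?_eq_some_iff.mp ht
      have htlt' : t < g.items.length := by omega
      have hidxA : PySem.List.index? rml r = some t := by
        unfold PySem.List.index?; rw [hk]; exact ht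
      have hold : g.getD r [] = g.items[t].2 := by
        rw [pvKeyVal g r t hnd ht, List.getD_eq_getElem?_getD]
        simp [PySem.Dict.values, List.getElem?_eq_getElem htlt']
      have hitems : (PySem.Dict.modify g r [] (· ++ [(i, x)])).items
          = g.items.set t (r, g.items[t].2 ++ [(i, x)]) := by
        unfold PySem.Dict.modify
        rw [PySem.Dict.items_insert_of_contains g _ hcont, hold]
        exact pvMapReplaceEqSet g.items r _ t (by simpa [PySem.Dict.keys] using hnd)
          (by simpa [PySem.Dict.keys] using ht)
      have hkeys' : (PySem.Dict.modify g r [] (· ++ [(i, x)])).keys = g.keys := by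
        simp only [PySem.Dict.keys, hitems, List.map_set]
        have hre : r = (List.map (fun x => x.1) g.items)[t]'(by simpa using htlt') := by
          simpa [PySem.Dict.keys] using htk.symm
        rw [hre, List.set_getElem_self]
      have hvals' : (PySem.Dict.modify g r [] (· ++ [(i, x)])).values
          = g.values.set t (g.items[t].2 ++ [(i, x)]) := by
        simp [PySem.Dict.values, hitems, List.map_set]
      have hmiT : mi.getD t [] = g.items[t].2.map Prod.fst := by
        rw [hmi]
        rw [List.getD_eq_getElem _ _ (by simpa using (by omega : t < g.values.length))]
        simp [PySem.Dict.values]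
      have hmnT : mn.getD t 0 = (g.items[t].2.length : Int) := by
        rw [hmn]
        rw [List.getD_eq_getElem _ _ (by simpa using (by omega : t < g.values.length))]
        simp [PySem.Dict.values]
      rw [hidxA]
      simp only [Option.getD_some, PySem.List.pySetD_natCast, PySem.List.pyGetD_natCast]
      refine ⟨?_, ?_, ?_, ?_, ?_⟩
      · simpa [hkeys'] using hk
      · show mi.set t (mi.getD t [] ++ [i]) = _
        rw [hvals', List.map_set, ← hmi, hmiT]
        simp
      · show mn.set t (mn.getD t 0 + 1) = _
        rw [hvals', List.map_set, ← hmn, hmnT]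
        simp
      · rw [hkeys']; exact hnd
      · intro pr hpr q hq
        rw [hitems] at hpr
        rcases List.mem_or_eq_of_mem_set hpr with hin | rfl
        · obtain ⟨hg, hq0, hqi⟩ := hh pr hin q hq
          exact ⟨by rw [PySem.Dict.get?_insert_of_ne _ _ (by omega : q.1 ≠ i)]; exact hg, hq0, by omega⟩
        · rcases List.mem_append.mp hq with hqold | hqnew
          · obtain ⟨hg, hq0, hqi⟩ := hh g.items[t] (List.getElem_mem htlt') q hqold
            exact ⟨by rw [PySem.Dict.get?_insert_of_ne _ _ (by omega : q.1 ≠ i)]; exact hg, hq0, by omega⟩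
          · obtain rfl : q = (i, x) := by simpa using hqnew
            exact ⟨PySem.Dict.get?_insert_self _ _ _, h0, by omega⟩
    · rw [if_neg hmem]
      have hrk : r ∉ g.keys := hk ▸ hmem
      have hcont : g.contains r = false := by
        rw [← Bool.not_eq_true]
        intro hc
        exact hrk ((PySem.Dict.contains_iff_mem_keys g r).mp hc)
      have hitems : (PySem.Dict.modify g r [] (· ++ [(i, x)])).items
          = g.items ++ [(r, [(i, x)])] := by
        unfold PySem.Dict.modify
        rw [PySem.Dict.getD_of_not_contains g _ hcont]
        rw [PySem.Dict.items_insert_of_not_contains g _ hcont]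
        simp
      refine ⟨?_, ?_, ?_, ?_, ?_⟩
      · show rml ++ [r] = _
        simp [PySem.Dict.keys, hitems, hk]
      · show mi ++ [[i]] = _
        simp [PySem.Dict.values, hitems, hmi]
      · show mn ++ [1] = _
        simp [PySem.Dict.values, hitems, hmn]
      · show (PySem.Dict.modify g r [] (· ++ [(i, x)])).keys.Nodup
        have : (PySem.Dict.modify g r [] (· ++ [(i, x)])).keys = g.keys ++ [r] := by
          simp [PySem.Dict.keys, hitems]
        rw [this]
        simp only [List.nodup_append, List.nodup_cons]
        refine ⟨hnd, by simp, ?_⟩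
        intro a ha e he heq
        obtain rfl : e = r := by simpa using he
        exact hrk (heq ▸ ha)
      · intro pr hpr q hq
        rw [hitems] at hpr
        rcases List.mem_append.mp hpr with hin | hnew
        · obtain ⟨hg, hq0, hqi⟩ := hh pr hin q hq
          exact ⟨by rw [PySem.Dict.get?_insert_of_ne _ _ (by omega : q.1 ≠ i)]; exact hg, hq0, by omega⟩
        · obtain rfl : pr = (r, [(i, x)]) := by simpa using hnew
          obtain rfl : q = (i, x) := by simpa using hq
          exact ⟨PySem.Dict.get?_insert_self _ _ _, h0, by omega⟩
  · simp only [pvAStep, pvBStep, if_neg hx]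
    exact pvInv_mono ⟨hk, hmi, hmn, hnd, hh⟩ (by omega)

theorem pvLoop (c1 : List Int) (xs : List Int) :
    ∀ (start : Int) st g, 0 ≤ start → pvInv start st g →
    pvInv (start + xs.length)
      ((PySem.List.enumerate xs start).foldl (pvAStep c1) st)
      ((PySem.List.enumerate xs start).foldl
        (pvBStep ((List.range (c1.length + 1)).map (pvCnt c1)) (PySem.List.len c1)) g) := by
  induction xs with
  | nil => intro start st g h0 hinv; simpa [PySem.List.enumerate] using pvInv_mono hinv (by omega)
  | cons x t ih =>
    intro start st g h0 hinv
    have hen : PySem.List.enumerate (x :: t) start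
        = (start, x) :: PySem.List.enumerate t (start + 1) := rfl
    rw [hen]
    simp only [List.foldl_cons]
    have heq : start + ((x :: t).length : Int) = (start + 1) + (t.length : Int) := by
      simp only [List.length_cons]; push_cast; ring
    rw [heq]
    exact ih (start + 1) _ _ (by omega) (pvStep c1 start x st g h0 hinv)

-- one chunk of A's output = B's chunk for the same real length r
theorem pvChunk (g : PySem.Dict Int (List (Int × Int))) (hinfo : PySem.Dict Int Int)
    (mi : List (List Int)) (r : Int) (acc : List (List Int))
    (hnd : g.keys.Nodup)
    (hmi : mi = g.values.map (fun v => v.map Prod.fst))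
    (hh : ∀ pr ∈ g.items, ∀ q ∈ pr.2, hinfo.get? q.1 = some q.2) :
    (if r ∈ g.keys then
        pvAEmit hinfo (PySem.List.pyGetD mi
          (((PySem.List.index? g.keys r).getD 0 : Nat) : Int) []) acc
      else acc)
      = acc ++ (g.getD r []).map (fun q => [q.1, q.1 + q.2 - 1]) := by
  by_cases hmem : r ∈ g.keys
  · rw [if_pos hmem]
    obtain ⟨t, ht⟩ : ∃ t, List.idxOf? r g.keys = some t := by
      cases hcase : List.idxOf? r g.keys with
      | none => exact absurd (List.idxOf?_eq_none_iff.mp hcase) (by simpa using hmem)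
      | some t => exact ⟨t, rfl⟩
    obtain ⟨htlt, htk, -⟩ := List.idxOf?_eq_some_iff.mp ht
    have htlt' : t < g.items.length := by simpa [PySem.Dict.keys] using htlt
    have hidx : PySem.List.index? g.keys r = some t := ht
    rw [hidx]
    simp only [Option.getD_some, PySem.List.pyGetD_natCast]
    have hmiT : mi.getD t [] = g.items[t].2.map Prod.fst := by
      rw [hmi]
      rw [List.getD_eq_getElem _ _ (by simpa [PySem.Dict.values] using htlt')]
      simp [PySem.Dict.values]
    have hold : g.getD r [] = g.items[t].2 := by
      rw [pvKeyVal g r t hnd ht, List.getD_eq_getElem?_getD]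
      simp [PySem.Dict.values, List.getElem?_eq_getElem htlt']
    unfold pvAEmit
    rw [PySem.List.foldl_append_singleton_eq_map
      (fun idx => [idx, idx + hinfo.getD idx 0 - 1]), hmiT, hold, List.map_map]
    congr 1
    apply List.map_congr_left
    intro q hq
    have := (hh g.items[t] (List.getElem_mem htlt') q hq)
    simp only [Function.comp]
    rw [PySem.Dict.getD_eq_get?_getD, this]
    rfl
  · rw [if_neg hmem]
    have hcont : g.contains r = false := by
      rw [← Bool.not_eq_true]
      intro hc
      exact hmem ((PySem.Dict.contains_iff_mem_keys g r).mp hc)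
    rw [PySem.Dict.getD_of_not_contains g _ hcont]
    simp

-- ===== VERDICT (by name: the statement is the Claim_ definition above) =====
theorem get_col_0_merge_info_spec : Claim_equal_get_col_0_merge_info := by
  intro c0 c1 _hdom
  unfold Spec_get_col_0_merge_info get_col_0_merge_info get_col_0_merge_info_alt
  rw [pvPrefix_spec c1]
  have hinit : pvInv 0 ([], [], [], [], PySem.Dict.empty)
      (PySem.Dict.empty : PySem.Dict Int (List (Int × Int))) := by
    refine ⟨rfl, rfl, rfl, by simp [PySem.Dict.keys, PySem.Dict.empty], ?_⟩
    intro pr hpr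
    simp [PySem.Dict.empty] at hpr
  have hloop := pvLoop c1 c0 0 ([], [], [], [], PySem.Dict.empty) PySem.Dict.empty le_rfl hinit
  dsimp only
  set g := (PySem.List.enumerate c0).foldl
      (pvBStep ((List.range (c1.length + 1)).map (pvCnt c1)) (PySem.List.len c1))
      (PySem.Dict.empty : PySem.Dict Int (List (Int × Int))) with hg
  set stA := (PySem.List.enumerate c0).foldl (pvAStep c1)
      (([], [], [], [], PySem.Dict.empty) :
        List Int × List Int × List (List Int) × List Int × PySem.Dict Int Int) with hstA
  obtain ⟨hk, hmi, hmn, hnd, hh⟩ := hloop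
  set hinfo := stA.2.2.2.2 with hhinfo
  rw [hk, hmi, hmn]
  by_cases hempty : g.items = []
  · rw [if_pos (show g.values.map (fun v => ((v.length : Nat) : Int)) = [] by
        simp [PySem.Dict.values, hempty]),
      if_pos (show g.size = 0 by simp [PySem.Dict.size, hempty])]
  · have hvne : g.values.map (fun v => (v.length : Int)) ≠ [] := by
      simp [PySem.Dict.values, hempty]
    rw [if_neg hvne, if_neg (show ¬ g.size = 0 by simp [PySem.Dict.size, hempty])]
    have hmn' : g.values.map (fun v => (v.length : Int))
        = g.items.map (fun pr => (pr.2.length : Int)) := by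
      simp [PySem.Dict.values]
    have hkeys' : g.keys = g.items.map Prod.fst := rfl
    obtain ⟨m, j, hmax, hidx, hjlt, hgd, hbmax⟩ := pvSel g.items
      (fun k => PySem.List.len (g.getD k []))
      (fun pr hpr => by
        show PySem.List.len (g.getD pr.1 []) = ((pr.2.length : Nat) : Int)
        rw [PySem.Dict.getD_of_mem_items g (by rw [← Prod.mk.eta (p := pr)]; exact hpr) hnd]
        exact PySem.List.len_eq _) hempty
    rw [hmn', hmax]
    simp only [Option.getD_some]
    unfold PySem.List.index?
    rw [hidx]
    simp only [Option.getD_some, PySem.List.pyGetD_natCast]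
    unfold PySem.List.maxD
    rw [← hkeys'] at hbmax
    rw [hbmax]
    simp only [Option.getD_some]
    set best := g.keys.getD j 0 with hbest
    have hjk : j < g.keys.length := by simpa [PySem.Dict.keys] using hjlt
    have hbestj : best = g.keys[j] := List.getD_eq_getElem _ _ hjk
    have hidxbest : List.idxOf? best g.keys = some j := by
      rw [hbestj]
      refine List.idxOf?_eq_some_iff.mpr ⟨hjk, rfl, ?_⟩
      intro jj hjj e
      have := (List.Nodup.getElem_inj_iff hnd).mp e
      omega
    have hmembest : best ∈ g.keys := hbestj ▸ List.getElem_mem hjk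
    have hchunk : ∀ r acc,
        (if r ∈ g.keys then
            pvAEmit hinfo ((g.values.map (fun v => v.map Prod.fst)).getD
              ((List.idxOf? r g.keys).getD 0) []) acc
          else acc)
          = acc ++ (g.getD r []).map (fun q => [q.1, q.1 + q.2 - 1]) := by
      intro r acc
      have h := pvChunk g hinfo _ r acc hnd rfl (fun pr hpr q hq => (hh pr hpr q hq).1)
      simpa only [PySem.List.pyGetD_natCast] using h
    have hmain : ∀ acc, pvAEmit hinfo ((g.values.map (fun v => v.map Prod.fst)).getD j []) acc
        = acc ++ (g.getD best []).map (fun q => [q.1, q.1 + q.2 - 1]) := by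
      intro acc
      have h := hchunk best acc
      rw [if_pos hmembest, hidxbest] at h
      simpa using h
    rw [← hmi]
    by_cases h4 : best ≥ 4
    · rw [if_pos h4, if_pos h4]
      rw [hmi]
      rw [hmain, hchunk, hchunk, hchunk, hchunk, hchunk]
      simp [List.append_assoc]
    · rw [if_neg h4, if_neg h4]
      rw [hmi, hmain]
      simp
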